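-- pv_equiv track=rewrite | github.com/chachr81/landsat_data | etl/bronze_ingestion.py | _extract_band_name
-- ===== SOURCE A (Python) =====
-- from typing import Dict, List, Optional, Tuple
--
-- def _extract_band_name(filename: str) -> Optional[str]:
--     """
--     Extrae el nombre de la banda desde el nombre del archivo
--
--     Args:
--         filename: Nombre del archivo (ej: LC08_..._SR_B3.TIF)
--
--     Returns:
--         Optional[str]: Nombre de la banda o None
--     """
--     parts = filename.split('_')
--
--     for i, part in enumerate(parts):
--         if part in ['SR', 'ST', 'QA']:
--             if i + 1 < len(parts):
--                 band = f"{part}_{parts[i+1].split('.')[0]}"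
--                 return band
--
--     if 'MTL' in filename.upper():
--         return 'MTL'
--
--     return None
-- ===== SOURCE B (Python) =====
-- def _extract_band_name(filename):
--     # Single left-to-right character scan: at each token boundary test for a
--     # literal 'SR_'/'ST_'/'QA_' prefix and return it plus the following field
--     # truncated at the first '_' or '.'; no split, no intermediate list.
--     n = len(filename)
--     boundary = True
--     for i in range(n):
--         if boundary and filename[i:i+3] in ('SR_', 'ST_', 'QA_'):
--             j = i + 3
--             while j < n and filename[j] != '_' and filename[j] != '.':
--                 j += 1
--             return filename[i:j]
--         boundary = filename[i] == '_'
--     if 'MTL' in filename.upper():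
--         return 'MTL'
--     return None
-- ===== Notes on version B (the rewrite author's own statement) =====
-- stated objective: alternative
-- what changed: Replaces split('_') plus an enumerated token scan with a single left-to-right character scan that tests for a literal 'SR_'/'ST_'/'QA_' at each underscore boundary and slices the band out directly, building no intermediate token list.
import Mathlib
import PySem

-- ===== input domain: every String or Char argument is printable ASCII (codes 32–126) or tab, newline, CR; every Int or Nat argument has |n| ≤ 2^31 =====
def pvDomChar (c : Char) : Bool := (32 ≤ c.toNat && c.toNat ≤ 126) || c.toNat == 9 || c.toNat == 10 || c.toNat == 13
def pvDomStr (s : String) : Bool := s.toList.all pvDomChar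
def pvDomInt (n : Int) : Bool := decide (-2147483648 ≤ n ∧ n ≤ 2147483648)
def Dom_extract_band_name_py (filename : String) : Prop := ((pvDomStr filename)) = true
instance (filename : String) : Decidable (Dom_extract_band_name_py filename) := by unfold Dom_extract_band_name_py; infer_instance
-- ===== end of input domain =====

-- B replaces A's split('_') + token scan by one character-level scan that matches
-- 'SR_'/'ST_'/'QA_' at underscore boundaries directly (alternative decomposition, same cost).

-- ===== PORT A =====
-- the 'for i, part in enumerate(parts)' loop with early return;
-- 'i + 1 < len(parts)' is 'rest ≠ []' for the tail 'rest' after 'part'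
def pvALoop : List (List Char) → Option (List Char)
  | [] => none
  | p :: rest =>
    if p == "SR".toList || p == "ST".toList || p == "QA".toList then
      match rest with
      | [] => none        -- i + 1 < len(parts) fails; no further iteration can return
      | q :: _ =>
        -- f"{part}_{parts[i+1].split('.')[0]}" ; split never returns [], so [0] is headD
        some (p ++ '_' :: (PySem.Chars.splitOn q ['.']).headD [])
    else pvALoop rest

def extract_band_name_py (filename : String) : Option String :=
  match pvALoop (PySem.Chars.splitOn filename.toList ['_']) with
  | some band => some (String.ofList band)
  | none =>
    if PySem.Chars.isIn "MTL".toList (PySem.Chars.upper filename.toList) then some "MTL"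
    else none

-- ===== PORT B =====
-- filename[i:i+3] in ('SR_', 'ST_', 'QA_')
def pvTagPrefix (cs : List Char) : Bool :=
  cs.take 3 == "SR_".toList || cs.take 3 == "ST_".toList || cs.take 3 == "QA_".toList

-- the inner 'while j < n and filename[j] != '_' and filename[j] != '.'' loop,
-- collecting filename[i+3:j]
def pvBandTail (cs : List Char) : List Char :=
  cs.takeWhile (fun c => !(c == '_') && !(c == '.'))

-- the 'for i in range(n)' scan with the running 'boundary' flag; 'cs' is the suffix
-- filename[i:], so 'filename[i:j]' is take 3 ++ the collected band tail
def pvBScan : Bool → List Char → Option (List Char)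
  | _, [] => none
  | b, c :: rest =>
    if b && pvTagPrefix (c :: rest) then
      some ((c :: rest).take 3 ++ pvBandTail ((c :: rest).drop 3))
    else pvBScan (c == '_') rest

def extract_band_name_py_alt (filename : String) : Option String :=
  match pvBScan true filename.toList with
  | some band => some (String.ofList band)
  | none =>
    if PySem.Chars.isIn "MTL".toList (PySem.Chars.upper filename.toList) then some "MTL"
    else none

-- ===== PRECONDITION & SPEC =====
def Spec_extract_band_name_py (filename : String) (out : Option String) : Prop := out = extract_band_name_py_alt filename
instance (filename : String) (out : Option String) : Decidable (Spec_extract_band_name_py filename out) := by unfold Spec_extract_band_name_py; infer_instance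

-- ===== CLAIM (what is proved, stated in full; the proofs are below) =====
def Claim_equal_extract_band_name_py : Prop := ∀ (filename : String), Dom_extract_band_name_py filename → Spec_extract_band_name_py filename (extract_band_name_py filename)

-- ===== LEMMAS AND PROOFS =====
def splitChar (d : Char) : List Char → List (List Char)
  | [] => [[]]
  | c :: rest =>
    if c = d then [] :: splitChar d rest
    else
      match splitChar d rest with
      | [] => [[c]]
      | h :: t => (c :: h) :: t
theorem splitChar_ne_nil (d : Char) (cs : List Char) : splitChar d cs ≠ [] := by
  induction cs with
  | nil => simp [splitChar]
  | cons c rest ih =>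
    simp only [splitChar]
    split
    · simp
    · cases h : splitChar d rest <;> simp
theorem splitOn_go_eq (d : Char) (fuel : Nat) :
    ∀ (l cur : List Char) (hacc : List (List Char)), l.length ≤ fuel →
      PySem.Chars.splitOn.go [d] fuel l cur hacc =
        hacc.reverse ++
          (match splitChar d l with
           | [] => []
           | h :: t => (cur.reverse ++ h) :: t) := by
  induction fuel with
  | zero =>
    intro l cur hacc hl
    have : l = [] := by simpa using List.length_eq_zero_iff.mp (Nat.le_zero.mp hl)
    subst this
    simp [PySem.Chars.splitOn.go, splitChar]
  | succ f ih =>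
    intro l cur hacc hl
    cases l with
    | nil => simp [PySem.Chars.splitOn.go, splitChar]
    | cons c rest =>
      by_cases hc : c = d
      · subst hc
        have hpre : [c].isPrefixOf (c :: rest) = true := by simp [List.isPrefixOf]
        rw [PySem.Chars.splitOn.go]
        simp only [hpre, if_true, List.length_cons, List.length_nil, List.drop_succ_cons, List.drop_zero]
        rw [ih rest [] (cur.reverse :: hacc) (by simpa using Nat.lt_succ_iff.mp (by simpa using hl))]
        cases h : splitChar c rest with
        | nil => exact absurd h (splitChar_ne_nil _ _)
        | cons h' t => simp [splitChar, h]
      · have hpre : [d].isPrefixOf (c :: rest) = false := by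
          simp [List.isPrefixOf]
          exact fun hdc => hc hdc.symm
        rw [PySem.Chars.splitOn.go]
        simp only [hpre]
        rw [ih rest (c :: cur) hacc (by simpa using Nat.lt_succ_iff.mp (by simpa using hl))]
        cases h : splitChar d rest with
        | nil => exact absurd h (splitChar_ne_nil d rest)
        | cons h' t => simp [splitChar, h, hc]

theorem splitOn_singleton (d : Char) (cs : List Char) :
    PySem.Chars.splitOn cs [d] = splitChar d cs := by
  unfold PySem.Chars.splitOn
  rw [splitOn_go_eq d (cs.length + 1) cs [] [] (by omega)]
  cases h : splitChar d cs with
  | nil => exact absurd h (splitChar_ne_nil _ _)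
  | cons h' t => simp

theorem splitChar_headD (d : Char) (cs : List Char) :
    (splitChar d cs).headD [] = cs.takeWhile (fun c => !(c == d)) := by
  induction cs with
  | nil => simp [splitChar]
  | cons c rest ih =>
    by_cases hc : c = d
    · subst hc; simp [splitChar, List.takeWhile]
    · simp only [splitChar, if_neg hc]
      cases h : splitChar d rest with
      | nil => exact absurd h (splitChar_ne_nil _ _)
      | cons h' t =>
        rw [h] at ih
        simp [List.takeWhile, ← ih]
        simp [show (!c == d) = true by simpa using hc]

theorem splitChar_cases (cs : List Char) :
    (splitChar '_' cs = [cs] ∧ '_' ∉ cs) ∨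
      (∃ a b, cs = a ++ '_' :: b ∧ splitChar '_' cs = a :: splitChar '_' b) := by
  induction cs with
  | nil => left; simp [splitChar]
  | cons c rest ih =>
    by_cases hc : c = '_'
    · subst hc
      right
      exact ⟨[], rest, by simp, by simp [splitChar]⟩
    · rcases ih with ⟨h1, h2⟩ | ⟨a, b, hab, hsp⟩
      · left
        constructor
        · simp [splitChar, if_neg hc, h1]
        · simp [h2]
          exact fun he => hc he.symm
      · right
        refine ⟨c :: a, b, by simp [hab], ?_⟩
        simp [splitChar, if_neg hc, hsp]

theorem splitChar_append_nosep (a b : List Char) (ha : '_' ∉ a) :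
    splitChar '_' (a ++ '_' :: b) = a :: splitChar '_' b := by
  induction a with
  | nil => simp [splitChar]
  | cons c a' ih =>
    have hc : c ≠ '_' := fun h => ha (h ▸ List.mem_cons_self)
    have ha' : '_' ∉ a' := fun h => ha (List.mem_cons_of_mem _ h)
    simp only [List.cons_append, splitChar, if_neg hc, ih ha']

theorem splitChar_tail_of_cons (cs h : List Char) (t : List (List Char))
    (hsp : splitChar '_' cs = h :: t) (ht : t ≠ []) :
    ∃ b, cs = h ++ '_' :: b ∧ splitChar '_' b = t := by
  rcases splitChar_cases cs with ⟨h1, _⟩ | ⟨a, b, hab, hsp'⟩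
  · rw [h1] at hsp
    obtain ⟨rfl, rfl⟩ := by simpa using hsp
    exact absurd rfl ht
  · rw [hsp'] at hsp
    obtain ⟨rfl, rfl⟩ := by simpa using hsp
    exact ⟨b, hab, rfl⟩





theorem pvBandTail_eq (b : List Char) :
    (b.takeWhile (fun c => !(c == '_'))).takeWhile (fun c => !(c == '.')) = pvBandTail b := by
  rw [List.takeWhile_takeWhile]
  unfold pvBandTail
  congr 1
  funext a
  by_cases h1 : a = '_' <;> by_cases h2 : a = '.' <;> simp [h1, h2]

theorem aLoop_band (tg b : List Char)
    (htg : tg == "SR".toList || tg == "ST".toList || tg == "QA".toList) :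
    pvALoop (tg :: splitChar '_' b) = some (tg ++ '_' :: pvBandTail b) := by
  cases hq : splitChar '_' b with
  | nil => exact absurd hq (splitChar_ne_nil _ _)
  | cons q t' =>
    have hqv : q = b.takeWhile (fun c => !(c == '_')) := by
      have := splitChar_headD '_' b
      rw [hq] at this
      simpa using this
    simp only [pvALoop, htg, if_true]
    rw [splitOn_singleton, splitChar_headD, hqv, pvBandTail_eq]


theorem tag_case (c : Char) (rest tg : List Char)
    (htg : (tg == "SR".toList || tg == "ST".toList || tg == "QA".toList) = true)
    (hnotg : '_' ∉ tg)
    (hptag : pvTagPrefix (c :: rest) = true)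
    (htake : (c :: rest).take 3 = tg ++ ['_']) :
    pvBScan true (c :: rest) = pvALoop (splitChar '_' (c :: rest)) := by
  have hcs : c :: rest = tg ++ '_' :: (c :: rest).drop 3 := by
    conv_lhs => rw [← List.take_append_drop 3 (c :: rest)]
    rw [htake]
    simp
  have hsplit : splitChar '_' (c :: rest) = tg :: splitChar '_' ((c :: rest).drop 3) := by
    conv_lhs => rw [hcs]
    exact splitChar_append_nosep _ _ hnotg
  rw [hsplit, aLoop_band _ _ htg]
  simp only [pvBScan, hptag, Bool.and_true, htake]
  simp

theorem scan_eq (cs : List Char) :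
    pvBScan true cs = pvALoop (splitChar '_' cs) ∧
      pvBScan false cs = pvALoop (splitChar '_' cs).tail := by
  induction cs with
  | nil => simp [pvBScan, splitChar, pvALoop]
  | cons c rest ih =>
    by_cases hc : c = '_'
    · subst hc
      have hnp : pvTagPrefix ('_' :: rest) = false := by
        simp [pvTagPrefix]
      constructor
      · simp only [pvBScan, hnp, Bool.and_false]
        rw [if_neg (by simp)]
        simpa [splitChar, pvALoop] using ih.1
      · simp only [pvBScan, hnp, Bool.false_and]
        rw [if_neg (by simp)]
        simpa [splitChar] using ih.1
    · have hcb : (c == '_') = false := by simpa using hc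
      cases hsp : splitChar '_' rest with
      | nil => exact absurd hsp (splitChar_ne_nil _ _)
      | cons h t =>
        have hsc : splitChar '_' (c :: rest) = (c :: h) :: t := by
          simp [splitChar, if_neg hc, hsp]
        have hfalse : pvBScan false (c :: rest) = pvALoop t := by
          simp only [pvBScan, Bool.false_and]
          rw [if_neg (by simp), hcb]
          rw [ih.2, hsp]
          rfl
        constructor
        · by_cases htag : pvTagPrefix (c :: rest) = true
          · rcases (by simpa [pvTagPrefix, or_assoc] using htag :
                (c :: rest).take 3 = "SR_".toList ∨ (c :: rest).take 3 = "ST_".toList ∨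
                  (c :: rest).take 3 = "QA_".toList) with h1 | h1 | h1
            · exact tag_case c rest "SR".toList (by decide) (by decide) htag (by simpa using h1)
            · exact tag_case c rest "ST".toList (by decide) (by decide) htag (by simpa using h1)
            · exact tag_case c rest "QA".toList (by decide) (by decide) htag (by simpa using h1)
          · have hbf : (true && pvTagPrefix (c :: rest)) = false := by
              simp [Bool.eq_false_iff.mpr htag]
            have hl : pvBScan true (c :: rest) = pvALoop t := by
              simp only [pvBScan, hbf]
              rw [if_neg (by simp), hcb, ih.2, hsp]
              rfl
            rw [hl, hsc]
            by_cases hmem : ((c :: h) == "SR".toList || (c :: h) == "ST".toList ||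
                (c :: h) == "QA".toList) = true
            · have ht0 : t = [] := by
                by_contra htne
                obtain ⟨b, hb, _⟩ := splitChar_tail_of_cons _ _ _ hsc htne
                apply htag
                rcases (by simpa [or_assoc] using hmem :
                    c :: h = "SR".toList ∨ c :: h = "ST".toList ∨ c :: h = "QA".toList) with
                  h2 | h2 | h2 <;>
                · rw [h2] at hb
                  simp [pvTagPrefix, hb]
              subst ht0
              simp [pvALoop]
            · have hm := Bool.eq_false_iff.mpr hmem
              simp only [pvALoop, hm]
              simp
        · rw [hfalse, hsc]
          rfl

-- ===== VERDICT (by name: the statement is the Claim_ definition above) =====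
theorem extract_band_name_py_spec : Claim_equal_extract_band_name_py := by
  intro filename _
  unfold Spec_extract_band_name_py extract_band_name_py extract_band_name_py_alt
  rw [splitOn_singleton, ← (scan_eq filename.toList).1]
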